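-- pv_equiv track=rewrite | github.com/XxKotfeJxX/YourSchedule | src/app/services/greedy_scheduler.py | _has_resource_conflict
-- ===== SOURCE A (Python) =====
-- def _has_resource_conflict(
--
--     block_ids: list[int],
--     required_resources: set[int],
--     resource_reservations: dict[int, set[int]],
-- ) -> bool:
--     if not required_resources:
--         return False
--     for block_id in block_ids:
--         if resource_reservations.get(block_id, set()) & required_resources:
--             return True
--     return False
-- ===== SOURCE B (Python) =====
-- def _has_resource_conflict(
--     block_ids: list[int],
--     required_resources: set[int],
--     resource_reservations: dict[int, set[int]],
-- ) -> bool: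
--     wanted = set(block_ids)
--     return any(
--         bid in wanted and not required_resources.isdisjoint(reserved)
--         for bid, reserved in resource_reservations.items()
--     )
-- ===== Notes on version B (the rewrite author's own statement) =====
-- stated objective: alternative
-- what changed: Inverted the traversal: instead of scanning block_ids and looking each one up in the dict (with an empty-set default and an explicit empty-required guard), B iterates once over the dict's items, testing key membership in a prebuilt set of block_ids and disjointness with required_resources.
import Mathlib
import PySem

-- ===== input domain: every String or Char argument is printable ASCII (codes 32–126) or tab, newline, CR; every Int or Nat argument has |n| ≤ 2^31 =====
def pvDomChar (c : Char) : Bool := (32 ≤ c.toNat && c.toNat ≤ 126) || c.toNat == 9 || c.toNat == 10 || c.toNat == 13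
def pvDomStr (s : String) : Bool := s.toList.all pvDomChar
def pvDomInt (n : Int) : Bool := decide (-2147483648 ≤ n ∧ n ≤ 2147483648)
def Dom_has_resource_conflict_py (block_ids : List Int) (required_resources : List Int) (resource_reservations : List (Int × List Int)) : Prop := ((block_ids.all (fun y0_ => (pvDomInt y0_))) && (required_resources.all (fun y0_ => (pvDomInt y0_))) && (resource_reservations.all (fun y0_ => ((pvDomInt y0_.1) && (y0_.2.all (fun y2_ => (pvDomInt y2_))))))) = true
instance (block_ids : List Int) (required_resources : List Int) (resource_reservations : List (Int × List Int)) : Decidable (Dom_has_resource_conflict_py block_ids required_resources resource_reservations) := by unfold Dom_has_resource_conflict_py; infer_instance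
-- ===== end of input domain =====

-- B inverts the traversal: instead of scanning block_ids and looking each up in the dict,
-- it iterates once over the dict's items, testing key membership in a prebuilt set of
-- block_ids and non-disjointness with required_resources (objective: alternative).

-- ===== PORT A =====
def has_resource_conflict_py (block_ids : List Int) (required_resources : List Int) (resource_reservations : List (Int × List Int)) : Bool :=
  if required_resources.isEmpty then false
  else block_ids.any (fun block_id =>
    !(PySem.Set.inter (PySem.Dict.getD (PySem.Dict.ofList resource_reservations) block_id []) required_resources).isEmpty)

-- ===== PORT B =====
def has_resource_conflict_py_alt (block_ids : List Int) (required_resources : List Int) (resource_reservations : List (Int × List Int)) : Bool :=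
  let wanted := PySem.Set.ofList block_ids
  (PySem.Dict.ofList resource_reservations).items.any
    (fun p => PySem.Set.contains wanted p.1 && !(PySem.Set.isdisjoint required_resources p.2))

-- ===== PRECONDITION & SPEC =====
def Spec_has_resource_conflict_py (block_ids : List Int) (required_resources : List Int) (resource_reservations : List (Int × List Int)) (out : Bool) : Prop := out = has_resource_conflict_py_alt block_ids required_resources resource_reservations
instance (block_ids : List Int) (required_resources : List Int) (resource_reservations : List (Int × List Int)) (out : Bool) : Decidable (Spec_has_resource_conflict_py block_ids required_resources resource_reservations out) := by unfold Spec_has_resource_conflict_py; infer_instance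

-- ===== CLAIM (what is proved, stated in full; the proofs are below) =====
def Claim_equal_has_resource_conflict_py : Prop := ∀ (block_ids : List Int) (required_resources : List Int) (resource_reservations : List (Int × List Int)), Dom_has_resource_conflict_py block_ids required_resources resource_reservations → Spec_has_resource_conflict_py block_ids required_resources resource_reservations (has_resource_conflict_py block_ids required_resources resource_reservations)

-- ===== LEMMAS AND PROOFS =====

-- A's truthiness test on an intersection, as an existential
lemma inter_nonempty_iff (s t : List Int) :
    (!(PySem.Set.inter s t).isEmpty) = true ↔ ∃ y, y ∈ s ∧ y ∈ t := by
  rw [Bool.not_eq_eq_eq_not, Bool.not_true, List.isEmpty_eq_false_iff_exists_mem]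
  constructor
  · rintro ⟨y, hy⟩; exact ⟨y, (PySem.Set.mem_inter _ _ _).1 hy⟩
  · rintro ⟨y, hy⟩; exact ⟨y, (PySem.Set.mem_inter _ _ _).2 hy⟩

-- B's per-item test, as an existential
lemma b_item_iff (bids req : List Int) (p : Int × List Int) :
    (PySem.Set.contains (PySem.Set.ofList bids) p.1 && !(PySem.Set.isdisjoint req p.2)) = true ↔
      p.1 ∈ bids ∧ ∃ y, y ∈ req ∧ y ∈ p.2 := by
  rw [Bool.and_eq_true, Bool.not_eq_eq_eq_not, Bool.not_true]
  constructor
  · rintro ⟨h1, h2⟩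
    refine ⟨(PySem.Set.mem_ofList _ _).1 ((PySem.Set.contains_iff _ _).1 h1), ?_⟩
    by_contra hno
    push Not at hno
    exact absurd ((PySem.Set.isdisjoint_iff _ _).2 fun x hx => hno x hx) (by simp [h2])
  · rintro ⟨h1, y, hy1, hy2⟩
    refine ⟨(PySem.Set.contains_iff _ _).2 ((PySem.Set.mem_ofList _ _).2 h1), ?_⟩
    cases hd : PySem.Set.isdisjoint req p.2 with
    | false => rfl
    | true => exact absurd hy2 ((PySem.Set.isdisjoint_iff _ _).1 hd y hy1)

-- ===== VERDICT (by name: the statement is the Claim_ definition above) =====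
theorem has_resource_conflict_py_spec : Claim_equal_has_resource_conflict_py := by
  intro bids req rr _
  show has_resource_conflict_py bids req rr = has_resource_conflict_py_alt bids req rr
  unfold has_resource_conflict_py has_resource_conflict_py_alt
  dsimp only
  set d := PySem.Dict.ofList rr with hd
  have hnd : d.keys.Nodup := PySem.Dict.nodup_keys_ofList rr
  rw [Bool.eq_iff_iff]
  constructor
  · intro h
    split_ifs at h with hreq
    rw [List.any_eq_true] at h
    obtain ⟨b, hb, hy⟩ := h
    rw [inter_nonempty_iff] at hy
    obtain ⟨y, hy1, hy2⟩ := hy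
    have hsome : d.get? b = some (PySem.Dict.getD d b []) := by
      cases hg : d.get? b with
      | none => simp [PySem.Dict.getD, hg] at hy1
      | some v => simp [PySem.Dict.getD, hg]
    have hmem : (b, PySem.Dict.getD d b []) ∈ d.items :=
      PySem.Dict.mem_items_of_get?_eq_some d hsome
    rw [List.any_eq_true]
    exact ⟨_, hmem, (b_item_iff bids req _).2 ⟨hb, y, hy2, hy1⟩⟩
  · intro h
    rw [List.any_eq_true] at h
    obtain ⟨p, hp, hptest⟩ := h
    rw [b_item_iff] at hptest
    obtain ⟨hb, y, hy1, hy2⟩ := hptest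
    have hreq : req.isEmpty = false := by
      cases req with
      | nil => cases hy1
      | cons _ _ => rfl
    rw [if_neg (by simp [hreq]), List.any_eq_true]
    refine ⟨p.1, hb, (inter_nonempty_iff _ _).2 ⟨y, ?_, hy1⟩⟩
    have : PySem.Dict.getD d p.1 [] = p.2 :=
      PySem.Dict.getD_of_mem_items d (by exact hp) hnd []
    rw [this]; exact hy2
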